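-- pv_equiv track=rewrite | github.com/kothaMeghana510/Cyber-Risk-Assessment-and--Threat-Intelligence-Platform | project/backend/appBackend/backend/services/exposureScore.py | exposure_score
-- ===== SOURCE A (Python) =====
-- def exposure_score(open_ports):
--     score = 2
--     for port in open_ports:
--         if port['service'] in ['telnet', 'rdp', 'ftp', 'vnc']:
--             score += 25
--
--         elif port['service'] in ['mysql', 'smb', 'postgresql', 'mongodb']:
--             score += 20
--
--         elif port['service'] in ['ssh', 'http', 'https']:
--             score += 5
--
--     return score
-- ===== SOURCE B (Python) =====
-- _WEIGHTS = (
--     ("telnet", 25), ("rdp", 25), ("ftp", 25), ("vnc", 25),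
--     ("mysql", 20), ("smb", 20), ("postgresql", 20), ("mongodb", 20),
--     ("ssh", 5), ("http", 5), ("https", 5),
-- )
--
--
-- def exposure_score(open_ports):
--     # pass 1: histogram of service names
--     counts = {}
--     for port in open_ports:
--         s = port['service']
--         counts[s] = counts.get(s, 0) + 1
--     # pass 2: weighted sum over the fixed table
--     return 2 + sum(w * counts.get(s, 0) for s, w in _WEIGHTS)
-- ===== Notes on version B (the rewrite author's own statement) =====
-- stated objective: alternative
-- what changed: Instead of A's single pass that branches per port and accumulates into a score variable, B first builds a frequency histogram of service names over the ports and then iterates over a fixed (service, weight) table, returning 2 plus the sum of weight*count; the per-port branch chain disappears entirely.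
import Mathlib
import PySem

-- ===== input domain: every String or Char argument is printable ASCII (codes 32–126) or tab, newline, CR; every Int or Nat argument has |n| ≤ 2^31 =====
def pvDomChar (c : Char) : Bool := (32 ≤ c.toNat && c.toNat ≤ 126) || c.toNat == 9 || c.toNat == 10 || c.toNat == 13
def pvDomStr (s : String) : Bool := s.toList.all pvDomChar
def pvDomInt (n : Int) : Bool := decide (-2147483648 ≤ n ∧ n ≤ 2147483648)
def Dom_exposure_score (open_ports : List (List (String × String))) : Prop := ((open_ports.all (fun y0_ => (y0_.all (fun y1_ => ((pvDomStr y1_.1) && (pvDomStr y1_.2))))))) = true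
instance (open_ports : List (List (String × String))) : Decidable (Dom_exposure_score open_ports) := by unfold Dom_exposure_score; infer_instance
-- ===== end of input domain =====

-- B replaces A's branch-per-port accumulation with two staged passes: a service-name
-- histogram, then a weighted sum over a fixed (service, weight) table; objective: alternative.

-- ===== PORT A =====
-- port['service'] is a dict subscript: first-match lookup; none = KeyError (excluded by Pre_).
def exposure_score (open_ports : List (List (String × String))) : Int :=
  open_ports.foldl (fun score port =>
    match (PySem.Dict.mk port).get? "service" with
    | none => score
    | some s =>
      if ["telnet", "rdp", "ftp", "vnc"].contains s then score + 25
      else if ["mysql", "smb", "postgresql", "mongodb"].contains s then score + 20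
      else if ["ssh", "http", "https"].contains s then score + 5
      else score) 2

-- ===== PORT B =====
def pvWeights : List (String × Int) :=
  [("telnet", 25), ("rdp", 25), ("ftp", 25), ("vnc", 25),
   ("mysql", 20), ("smb", 20), ("postgresql", 20), ("mongodb", 20),
   ("ssh", 5), ("http", 5), ("https", 5)]

def exposure_score_alt (open_ports : List (List (String × String))) : Int :=
  -- pass 1: histogram of service names (missing 'service' key = KeyError, excluded by Pre_)
  let counts : PySem.Dict String Int :=
    open_ports.foldl (fun d port =>
      match (PySem.Dict.mk port).get? "service" with
      | none => d
      | some s => d.insert s (d.getD s 0 + 1)) PySem.Dict.empty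
  -- pass 2: weighted sum over the fixed table
  2 + (pvWeights.map (fun p => p.2 * counts.getD p.1 0)).sum

-- ===== PRECONDITION & SPEC =====
-- Pre_ excludes ports without a 'service' key, on which the Python A raises KeyError.
def Pre_exposure_score (open_ports : List (List (String × String))) : Prop :=
  (open_ports.all (fun port => (PySem.Dict.mk port).contains "service")) = true
instance (open_ports : List (List (String × String))) : Decidable (Pre_exposure_score open_ports) := by unfold Pre_exposure_score; infer_instance
def pvWitness_exposure_score : (List (List (String × String))) := [[("service", "ssh")], [("service", "smtp")]]

def Spec_exposure_score (open_ports : List (List (String × String))) (out : Int) : Prop := out = exposure_score_alt open_ports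
instance (open_ports : List (List (String × String))) (out : Int) : Decidable (Spec_exposure_score open_ports out) := by unfold Spec_exposure_score; infer_instance

-- ===== CLAIM (what is proved, stated in full; the proofs are below) =====
def Claim_equal_exposure_score : Prop := ∀ (open_ports : List (List (String × String))), Dom_exposure_score open_ports → Pre_exposure_score open_ports → Spec_exposure_score open_ports (exposure_score open_ports)

-- ===== LEMMAS AND PROOFS =====

-- the per-service value A's branch chain adds
def pvF (s : String) : Int :=
  if ["telnet", "rdp", "ftp", "vnc"].contains s then 25
  else if ["mysql", "smb", "postgresql", "mongodb"].contains s then 20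
  else if ["ssh", "http", "https"].contains s then 5
  else 0

-- the extracted service names (one per port, in order)
def pvSvc (open_ports : List (List (String × String))) : List String :=
  open_ports.filterMap (fun port => (PySem.Dict.mk port).get? "service")

-- A's accumulator loop equals acc plus the sum of pvF over the service names.
theorem foldA_eq (open_ports : List (List (String × String))) (acc : Int) :
    open_ports.foldl (fun score port =>
      match (PySem.Dict.mk port).get? "service" with
      | none => score
      | some s =>
        if ["telnet", "rdp", "ftp", "vnc"].contains s then score + 25
        else if ["mysql", "smb", "postgresql", "mongodb"].contains s then score + 20
        else if ["ssh", "http", "https"].contains s then score + 5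
        else score) acc
    = acc + ((pvSvc open_ports).map pvF).sum := by
  induction open_ports generalizing acc with
  | nil => simp [pvSvc]
  | cons p rest ih =>
    simp only [List.foldl_cons, pvSvc, List.filterMap_cons]
    cases h : (PySem.Dict.mk p).get? "service" with
    | none => simpa [pvSvc] using ih acc
    | some s =>
      simp only [List.map_cons, List.sum_cons, pvSvc] at ih ⊢
      rw [ih]
      simp only [pvF]
      split_ifs <;> ring

-- B's histogram lookup counts occurrences of v among the service names.
theorem counts_getD (open_ports : List (List (String × String)))
    (d : PySem.Dict String Int) (v : String) :
    (open_ports.foldl (fun d port =>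
      match (PySem.Dict.mk port).get? "service" with
      | none => d
      | some s => d.insert s (d.getD s 0 + 1)) d).getD v 0
    = d.getD v 0 + ((pvSvc open_ports).count v : Int) := by
  induction open_ports generalizing d with
  | nil => simp [pvSvc]
  | cons p rest ih =>
    simp only [List.foldl_cons, pvSvc, List.filterMap_cons]
    cases h : (PySem.Dict.mk p).get? "service" with
    | none => simpa [pvSvc] using ih d
    | some s =>
      simp only [pvSvc] at ih
      rw [ih, PySem.Dict.getD_insert, List.count_cons]
      by_cases hv : v = s
      · subst hv; simp; ring
      · simp [hv, Ne.symm hv]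

-- the table sum of weight * indicator equals pvF, per service string
theorem table_indicator (x : String) :
    (pvWeights.map (fun p => p.2 * (if (x == p.1) then (1 : Int) else 0))).sum = pvF x := by
  by_cases h1 : x = "telnet"; · subst h1; decide
  by_cases h2 : x = "rdp"; · subst h2; decide
  by_cases h3 : x = "ftp"; · subst h3; decide
  by_cases h4 : x = "vnc"; · subst h4; decide
  by_cases h5 : x = "mysql"; · subst h5; decide
  by_cases h6 : x = "smb"; · subst h6; decide
  by_cases h7 : x = "postgresql"; · subst h7; decide
  by_cases h8 : x = "mongodb"; · subst h8; decide
  by_cases h9 : x = "ssh"; · subst h9; decide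
  by_cases h10 : x = "http"; · subst h10; decide
  by_cases h11 : x = "https"; · subst h11; decide
  simp [pvWeights, pvF, h1, h2, h3, h4, h5, h6, h7, h8, h9, h10, h11]

-- weighted counts over the table = sum of pvF over the service list
theorem table_sum_eq (ss : List String) :
    (pvWeights.map (fun p => p.2 * (ss.count p.1 : Int))).sum = (ss.map pvF).sum := by
  induction ss with
  | nil => decide
  | cons x ss ih =>
    simp only [List.map_cons, List.sum_cons, List.count_cons]
    rw [← ih, ← table_indicator x]
    rw [← PySem.List.sum_map_add_int]
    refine congrArg List.sum (List.map_congr_left fun p _ => ?_)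
    push_cast
    ring

-- ===== VERDICT (by name: the statement is the Claim_ definition above) =====
theorem exposure_score_spec : Claim_equal_exposure_score := by
  intro open_ports _ _
  unfold Spec_exposure_score exposure_score exposure_score_alt
  rw [foldA_eq]
  simp only [counts_getD, PySem.Dict.getD_empty, zero_add, table_sum_eq]
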